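-- pv_equiv track=rewrite | github.com/angelicalohdz/fastr-resource-hub | tools/03_convert_to_pptx.py | convert_slide_breaks
-- ===== SOURCE A (Python) =====
-- def convert_slide_breaks(content):
--     """
--     Convert Marp slide breaks (---) to pandoc slide breaks
--
--     Ensures proper slide separation in PowerPoint
--     """
--     lines = content.split('\n')
--     result = []
--
--     for i, line in enumerate(lines):
--         # If line is just --- (slide separator)
--         if line.strip() == '---':
--             # Add proper pandoc slide break (horizontal rule with blank lines)
--             result.append('')
--             result.append('---')
--             result.append('')
--         else:
--             result.append(line)
--
--     return '\n'.join(result)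
-- ===== SOURCE B (Python) =====
-- import re
--
-- # One regex substitution instead of split/loop/join: a line that is '---' padded by
-- # horizontal whitespace becomes '\n---\n'; the line's surrounding '\n' delimiters
-- # supply the blank lines, reproducing the join semantics exactly.
-- _SEP = re.compile(r'(?m)^[^\S\n]*---[^\S\n]*$')
--
-- def convert_slide_breaks(content):
--     """
--     Convert Marp slide breaks (---) to pandoc slide breaks
--
--     Ensures proper slide separation in PowerPoint
--     """
--     return _SEP.sub('\n---\n', content)
-- ===== Notes on version B (the rewrite author's own statement) =====
-- stated objective: idiomatic
-- what changed: Replaced the split/enumerate-loop/append/join pipeline with a single multiline regex substitution over the whole content that rewrites each whitespace-padded separator line to a blank-line-padded one in place, with no per-line accumulator.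
import Mathlib
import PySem

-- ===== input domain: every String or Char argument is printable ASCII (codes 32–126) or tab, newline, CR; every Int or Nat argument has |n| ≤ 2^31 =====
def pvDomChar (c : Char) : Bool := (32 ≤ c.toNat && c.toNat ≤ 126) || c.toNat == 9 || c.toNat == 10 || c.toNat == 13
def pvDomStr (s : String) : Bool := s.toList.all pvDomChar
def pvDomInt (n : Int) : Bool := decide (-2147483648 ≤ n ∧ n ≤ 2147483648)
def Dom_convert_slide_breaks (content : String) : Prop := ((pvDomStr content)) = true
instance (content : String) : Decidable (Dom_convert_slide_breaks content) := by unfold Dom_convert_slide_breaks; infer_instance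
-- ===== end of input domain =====

-- B replaces A's split/loop/join with one regex-style substitution pass ('(?m)^[^\S\n]*---[^\S\n]*$' → '\n---\n'); same return value, objective: idiomatic.

-- ===== PORT A =====
def convert_slide_breaks (content : String) : String :=
  let lines := PySem.Chars.splitOn content.toList "\n".toList
  let result := (PySem.List.enumerate lines 0).foldl
    (fun result il =>
      if PySem.Chars.strip il.2 = "---".toList then
        ((result ++ [([] : List Char)]) ++ ["---".toList]) ++ [([] : List Char)]
      else result ++ [il.2]) []
  String.ofList (PySem.Chars.join "\n".toList result)

-- ===== PORT B =====
-- Hand port of Source B's compiled regex '(?m)^[^\S\n]*---[^\S\n]*$' (no regex engine in PySem):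
-- the character class [^\S\n] on the ASCII domain is exactly {' ', '\t', '\r'} (\f/\v are outside Dom).
def pvIsHWS (c : Char) : Bool := c == ' ' || c == '\t' || c == '\r'

-- Try the regex match at a line start: [^\S\n]* then literal '---' then [^\S\n]* then $ (end or before '\n').
-- Returns the unconsumed remainder (the '\n' and beyond, or []) on success; exact: the classes are
-- greedy but no backtracking can help, since '-' is not in the class.
def pvTryMatch (cs : List Char) : Option (List Char) :=
  if ['-', '-', '-'].isPrefixOf (cs.dropWhile pvIsHWS) then
    if ((cs.dropWhile pvIsHWS).drop 3).dropWhile pvIsHWS = [] then some []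
    else if (((cs.dropWhile pvIsHWS).drop 3).dropWhile pvIsHWS).head? = some '\n' then
      some (((cs.dropWhile pvIsHWS).drop 3).dropWhile pvIsHWS)
    else none
  else none

theorem pvTryMatch_length_le {cs r : List Char} (h : pvTryMatch cs = some r) :
    r.length ≤ cs.length := by
  have k1 : (cs.dropWhile pvIsHWS).length ≤ cs.length := List.length_dropWhile_le _ _
  have k2 : ((cs.dropWhile pvIsHWS).drop 3).length ≤ (cs.dropWhile pvIsHWS).length := by
    simp [List.length_drop]
  have k3 : (((cs.dropWhile pvIsHWS).drop 3).dropWhile pvIsHWS).length ≤ ((cs.dropWhile pvIsHWS).drop 3).length :=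
    List.length_dropWhile_le _ _
  unfold pvTryMatch at h
  split_ifs at h with h1 h2 h3 <;> cases h <;> simp <;> omega

-- re.sub's scan: at each line start try the match; on success emit '\n---\n' and continue after the
-- matched line; otherwise copy the line unchanged; the '\n' between lines is copied either way.
def pvGo (cs : List Char) : List Char :=
  match h : pvTryMatch cs with
  | some rest =>
      '\n' :: '-' :: '-' :: '-' :: '\n' ::
        (if hr : rest.isEmpty then [] else '\n' :: pvGo rest.tail)
  | none =>
      cs.takeWhile (· != '\n') ++
        (if h2 : (cs.dropWhile (· != '\n')).isEmpty then []
         else '\n' :: pvGo (cs.dropWhile (· != '\n')).tail)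
termination_by cs.length
decreasing_by
  · have h1 := pvTryMatch_length_le h
    have h3 : rest ≠ [] := by simpa [List.isEmpty_iff] using hr
    have h4 : 0 < rest.length := List.length_pos_of_ne_nil h3
    simp only [List.length_tail]
    omega
  · have h1 := List.length_dropWhile_le (· != '\n') cs
    have h3 : cs.dropWhile (· != '\n') ≠ [] := by simpa [List.isEmpty_iff] using h2
    have h4 : 0 < (cs.dropWhile (· != '\n')).length := List.length_pos_of_ne_nil h3
    simp only [List.length_tail]
    omega

def convert_slide_breaks_alt (content : String) : String :=
  String.ofList (pvGo content.toList)

-- ===== PRECONDITION & SPEC =====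
def Spec_convert_slide_breaks (content : String) (out : String) : Prop := out = convert_slide_breaks_alt content
instance (content : String) (out : String) : Decidable (Spec_convert_slide_breaks content out) := by unfold Spec_convert_slide_breaks; infer_instance

-- ===== CLAIM (what is proved, stated in full; the proofs are below) =====
def Claim_equal_convert_slide_breaks : Prop := ∀ (content : String), Dom_convert_slide_breaks content → Spec_convert_slide_breaks content (convert_slide_breaks content)

-- ===== LEMMAS AND PROOFS =====

-- A's per-line expansion.
def pvF (l : List Char) : List (List Char) :=
  if PySem.Chars.strip l = "---".toList then [[], "---".toList, []] else [l]

-- Structural model of split('\n') with an accumulator for the current line.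
def pvSplit (pre : List Char) : List Char → List (List Char)
  | [] => [pre]
  | c :: t => if c = '\n' then pre :: pvSplit [] t else pvSplit (pre ++ [c]) t

theorem pvChar_eq_of_toNat {c d : Char} (h : c.toNat = d.toNat) : c = d := by
  have h1 := Char.ofNat_toNat c
  rw [h, Char.ofNat_toNat d] at h1
  exact h1.symm

-- On the ASCII domain, away from '\n', Python's str-whitespace is exactly the regex class [^\S\n].
theorem pvIsspace_eq_hws (c : Char) (hd : pvDomChar c = true) (hn : c ≠ '\n') :
    PySem.Chars.isspace c = pvIsHWS c := by
  have h10 : c.toNat ≠ 10 := fun h => hn (pvChar_eq_of_toNat h)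
  have e : ∀ (d : Char), (c == d) = (c.toNat == d.toNat) := by
    intro d
    rw [Bool.eq_iff_iff]
    simp only [beq_iff_eq]
    exact ⟨fun h => h ▸ rfl, pvChar_eq_of_toNat⟩
  simp only [pvDomChar] at hd
  rw [Bool.eq_iff_iff]
  simp only [PySem.Chars.isspace, pvIsHWS, e]
  simp only [Bool.or_eq_true, Bool.and_eq_true, decide_eq_true_eq, beq_iff_eq] at *
  have v1 : (' ').toNat = 32 := rfl
  have v2 : ('\t').toNat = 9 := rfl
  have v3 : ('\r').toNat = 13 := rfl
  rw [v1, v2, v3]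
  omega

theorem pvDropWhile_congr (p q : Char → Bool) (l : List Char)
    (h : ∀ c ∈ l, p c = q c) : l.dropWhile p = l.dropWhile q := by
  induction l with
  | nil => rfl
  | cons c t ih =>
    simp only [List.dropWhile_cons, h c (by simp)]
    split <;> simp [ih fun x hx => h x (by simp [hx])]

theorem pvDropWhile_head_false (p : Char → Bool) (l : List Char) (d : Char) (m : List Char)
    (h : l.dropWhile p = d :: m) : p d = false := by
  induction l with
  | nil => simp at h
  | cons c t ih =>
    by_cases hc : p c
    · exact ih (by simpa [List.dropWhile_cons, hc] using h)
    · simp only [List.dropWhile_cons] at h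
      rw [if_neg (by simp [hc])] at h
      cases h
      simpa using hc

-- splitOn's fuelled worker, characterised by pvSplit.
theorem pvSplitOn_go_spec (fuel : Nat) : ∀ (l cur acc : _),
    l.length ≤ fuel →
    PySem.Chars.splitOn.go ['\n'] fuel l cur acc = acc.reverse ++ pvSplit cur.reverse l := by
  induction fuel with
  | zero =>
    intro l cur acc hl
    rw [List.length_eq_zero_iff.mp (Nat.le_zero.mp hl)]
    simp [PySem.Chars.splitOn.go, pvSplit]
  | succ f ih =>
    intro l cur acc hl
    cases l with
    | nil => simp [PySem.Chars.splitOn.go, pvSplit]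
    | cons c rest =>
      simp only [PySem.Chars.splitOn.go]
      by_cases hc : c = '\n'
      · subst hc
        rw [if_pos (by simp [List.isPrefixOf])]
        have hd : List.drop ['\n'].length ('\n' :: rest) = rest := rfl
        rw [hd, ih rest [] (cur.reverse :: acc) (by simpa using Nat.le_of_succ_le_succ hl)]
        simp [pvSplit]
      · rw [if_neg (by simp [List.isPrefixOf, Ne.symm hc])]
        rw [ih rest (c :: cur) acc (by simpa using Nat.le_of_succ_le_succ hl)]
        simp [pvSplit, if_neg hc]

theorem pvSplitOn_eq (cs : List Char) :
    PySem.Chars.splitOn cs ['\n'] = pvSplit [] cs := by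
  unfold PySem.Chars.splitOn
  rw [pvSplitOn_go_spec (cs.length + 1) cs [] [] (by omega)]
  rfl

-- A's enumerate/append loop is a flatMap of the per-line expansion.
theorem pvFoldA (lines : List (List Char)) : ∀ (s : Int) (acc : List (List Char)),
    (PySem.List.enumerate lines s).foldl
      (fun result il =>
        if PySem.Chars.strip il.2 = "---".toList then
          ((result ++ [([] : List Char)]) ++ ["---".toList]) ++ [([] : List Char)]
        else result ++ [il.2]) acc = acc ++ lines.flatMap pvF := by
  induction lines with
  | nil => intro s acc; simp [PySem.List.enumerate_nil]
  | cons l L ih =>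
    intro s acc
    rw [PySem.List.enumerate_cons, List.foldl_cons, ih]
    have hnorm : "---".toList = ['-', '-', '-'] := rfl
    by_cases h : PySem.Chars.strip l = "---".toList <;>
      simp [hnorm, pvF, h, hnorm ▸ h]

-- pvSplit peels the first line off.
theorem pvSplit_eq (cs : List Char) : ∀ (pre : List Char),
    pvSplit pre cs = (pre ++ cs.takeWhile (· != '\n')) ::
      (match cs.dropWhile (· != '\n') with
       | [] => []
       | _ :: t => pvSplit [] t) := by
  induction cs with
  | nil => intro pre; simp [pvSplit]
  | cons c t ih =>
    intro pre
    by_cases hc : c = '\n'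
    · subst hc; simp [pvSplit]
    · simp only [pvSplit, if_neg hc, ih (pre ++ [c]),
        List.takeWhile_cons, List.dropWhile_cons]
      rw [if_pos (by simp [hc]), if_pos (by simp [hc])]
      simp

-- '---' matching does not look past the end of the line.
theorem pvPrefix_boundary (p : List Char) : ∀ (l r : List Char),
    (∀ c ∈ p, c ≠ '\n') → (r = [] ∨ r.head? = some '\n') →
    p.isPrefixOf (l ++ r) = p.isPrefixOf l := by
  induction p with
  | nil => intro l r _ _; simp [List.isPrefixOf]
  | cons c p' ih =>
    intro l r hp hr
    cases l with
    | nil =>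
      have hc : c ≠ '\n' := hp c (by simp)
      rcases hr with rfl | hr
      · rfl
      · cases r with
        | nil => simp at hr
        | cons a t =>
          simp only [List.head?_cons, Option.some.injEq] at hr
          subst hr
          simp [List.isPrefixOf, hc]
    | cons a l' =>
      simp [List.isPrefixOf, ih l' r (fun x hx => hp x (by simp [hx])) hr]

-- dropping [^\S\n]* does not look past the end of the line either.
theorem pvDropWhile_boundary (l r : List Char) (hr : r = [] ∨ r.head? = some '\n') :
    (l ++ r).dropWhile pvIsHWS = l.dropWhile pvIsHWS ++ r := by
  rw [List.dropWhile_append]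
  split
  · rename_i h
    rw [List.isEmpty_iff.mp h]
    rcases hr with rfl | hr
    · rfl
    · cases r with
      | nil => rfl
      | cons a t =>
        simp only [List.head?_cons, Option.some.injEq] at hr
        subst hr
        simp [List.dropWhile_cons, pvIsHWS]
  · rfl

-- The crux: at a line start, the regex match succeeds exactly when the line strips to '---'.
theorem pvTryMatch_eq (l r : List Char)
    (hdom : ∀ c ∈ l, pvDomChar c = true) (hnl : '\n' ∉ l)
    (hr : r = [] ∨ r.head? = some '\n') :
    pvTryMatch (l ++ r) = if PySem.Chars.strip l = "---".toList then some r else none := by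
  have hnorm : "---".toList = ['-', '-', '-'] := rfl
  have hisw : ∀ c ∈ l, PySem.Chars.isspace c = pvIsHWS c :=
    fun c hc => pvIsspace_eq_hws c (hdom c hc) (fun h => hnl (h ▸ hc))
  have hml1 : ∀ c ∈ l.dropWhile pvIsHWS, c ∈ l :=
    fun c hc => (List.dropWhile_sublist _).subset hc
  have hstrip : PySem.Chars.strip l =
      ((l.dropWhile pvIsHWS).reverse.dropWhile pvIsHWS).reverse := by
    unfold PySem.Chars.strip PySem.Chars.lstrip PySem.Chars.rstrip
    rw [pvDropWhile_congr _ pvIsHWS l hisw,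
      pvDropWhile_congr PySem.Chars.isspace pvIsHWS (l.dropWhile pvIsHWS).reverse
        (fun c hc => hisw c (hml1 c (List.mem_reverse.mp hc)))]
  unfold pvTryMatch
  rw [pvDropWhile_boundary l r hr,
    pvPrefix_boundary ['-', '-', '-'] (l.dropWhile pvIsHWS) r (by intro c hc; fin_cases hc <;> decide) hr]
  by_cases hpre : ['-', '-', '-'].isPrefixOf (l.dropWhile pvIsHWS) = true
  · obtain ⟨m, hm⟩ := List.isPrefixOf_iff_prefix.mp hpre
    rw [if_pos hpre]
    rw [show l.dropWhile pvIsHWS = ['-', '-', '-'] ++ m from hm.symm]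
    have hdrop3 : ((['-', '-', '-'] ++ m) ++ r).drop 3 = m ++ r := by simp
    rw [hdrop3, pvDropWhile_boundary m r hr]
    have hmem : ∀ c ∈ m, c ∈ l := fun c hc => hml1 c (by rw [← hm]; simp [hc])
    have hrevapp : (['-', '-', '-'] ++ m).reverse = m.reverse ++ ['-', '-', '-'] := by simp
    by_cases hmm : m.dropWhile pvIsHWS = []
    · have hall : ∀ c ∈ m.reverse, pvIsHWS c = true := by
        intro c hc
        exact List.dropWhile_eq_nil_iff.mp hmm c (List.mem_reverse.mp hc)
      have hcond : PySem.Chars.strip l = "---".toList := by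
        rw [hstrip, show l.dropWhile pvIsHWS = ['-', '-', '-'] ++ m from hm.symm,
          hrevapp, List.dropWhile_append,
          if_pos (List.isEmpty_iff.mpr (List.dropWhile_eq_nil_iff.mpr hall))]
        rfl
      rw [if_pos hcond, hmm, List.nil_append]
      rcases hr with rfl | hh
      · rw [if_pos rfl]
      · cases r with
        | nil => simp at hh
        | cons a t =>
          simp only [List.head?_cons, Option.some.injEq] at hh
          subst hh
          rw [if_neg (by simp), if_pos (by simp)]
    · obtain ⟨d, m₂, hdm⟩ := List.exists_cons_of_ne_nil hmm
      have hd_hws : pvIsHWS d = false := pvDropWhile_head_false pvIsHWS m d m₂ hdm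
      have hdl : d ∈ l := hmem d ((List.dropWhile_sublist _).subset (by rw [hdm]; simp))
      have hdn : d ≠ '\n' := fun h => hnl (h ▸ hdl)
      have hcond : ¬ PySem.Chars.strip l = "---".toList := by
        rw [hstrip, show l.dropWhile pvIsHWS = ['-', '-', '-'] ++ m from hm.symm, hrevapp,
          List.dropWhile_append, hnorm]
        rw [if_neg (by
          simp only [List.isEmpty_iff, List.dropWhile_eq_nil_iff, List.mem_reverse]
          intro hall
          exact hmm (List.dropWhile_eq_nil_iff.mpr hall))]
        intro h
        have hlen := congrArg List.length h
        simp only [List.length_reverse, List.length_append, List.length_cons,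
          List.length_nil] at hlen
        have hne : m.reverse.dropWhile pvIsHWS ≠ [] := by
          simp only [ne_eq, List.dropWhile_eq_nil_iff, List.mem_reverse]
          intro hall
          exact hmm (List.dropWhile_eq_nil_iff.mpr hall)
        have := List.length_pos_of_ne_nil hne
        omega
      rw [if_neg hcond, hdm]
      rw [if_neg (by simp), if_neg (by simp [hdn])]
  · rw [if_neg hpre, if_neg ?_]
    intro hc
    rw [hstrip, hnorm] at hc
    have h2 : (l.dropWhile pvIsHWS).reverse.dropWhile pvIsHWS = ['-', '-', '-'] := by
      rw [← List.reverse_inj, hc]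
      rfl
    have hsuf : ['-', '-', '-'] <:+ (l.dropWhile pvIsHWS).reverse :=
      h2 ▸ List.dropWhile_suffix _
    obtain ⟨u, hu⟩ := hsuf
    apply hpre
    apply List.isPrefixOf_iff_prefix.mpr
    refine ⟨u.reverse, ?_⟩
    have := congrArg List.reverse hu
    simpa using this

theorem pvF_ne_nil (x : List Char) : pvF x ≠ [] := by
  unfold pvF; split <;> simp

theorem pvSplit_ne_nil (pre cs : List Char) : pvSplit pre cs ≠ [] := by
  rw [pvSplit_eq]; simp

theorem pvFlat_ne_nil (L : List (List Char)) (hL : L ≠ []) : L.flatMap pvF ≠ [] := by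
  cases L with
  | nil => cases hL rfl
  | cons x X =>
    simp only [List.flatMap_cons]
    intro hc
    exact pvF_ne_nil _ (List.append_eq_nil_iff.mp hc).1

theorem pvJoinHead (x : List Char) (Q : List (List Char)) (hQ : Q ≠ []) :
    PySem.Chars.join ['\n'] (x :: Q) = x ++ '\n' :: PySem.Chars.join ['\n'] Q := by
  cases Q with
  | nil => cases hQ rfl
  | cons q Q' => rw [PySem.Chars.join_cons_cons]; simp

-- The whole-content induction: re.sub's scan equals join(flatMap) over the split lines.
theorem pvMain (cs : List Char) (hdom : ∀ c ∈ cs, pvDomChar c = true) :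
    pvGo cs = PySem.Chars.join ['\n'] ((pvSplit [] cs).flatMap pvF) := by
  suffices h : ∀ (n : Nat) (cs : List Char), cs.length ≤ n → (∀ c ∈ cs, pvDomChar c = true) →
      pvGo cs = PySem.Chars.join ['\n'] ((pvSplit [] cs).flatMap pvF) from
    h cs.length cs le_rfl hdom
  intro n
  induction n using Nat.strong_induction_on with
  | _ n ih =>
    intro cs hlen hdomc
    have hsplitcs := List.takeWhile_append_dropWhile (p := (· != '\n')) (l := cs)
    have hdoml : ∀ c ∈ cs.takeWhile (· != '\n'), pvDomChar c = true :=
      fun c hc => hdomc c ((List.takeWhile_sublist _).subset hc)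
    have hnl : '\n' ∉ cs.takeWhile (· != '\n') := by
      intro h
      have := List.mem_takeWhile_imp h
      simp at this
    have hr : cs.dropWhile (· != '\n') = [] ∨
        (cs.dropWhile (· != '\n')).head? = some '\n' := by
      cases hd : cs.dropWhile (· != '\n') with
      | nil => exact Or.inl rfl
      | cons a t =>
        right
        have := pvDropWhile_head_false _ cs a t hd
        have ha : a = '\n' := by simpa using this
        simp [ha]
    have hTM : pvTryMatch cs =
        if PySem.Chars.strip (cs.takeWhile (· != '\n')) = "---".toList then
          some (cs.dropWhile (· != '\n')) else none := by
      conv_lhs => rw [← hsplitcs]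
      exact pvTryMatch_eq _ _ hdoml hnl hr
    rw [pvSplit_eq cs [], List.nil_append]
    rw [pvGo]
    by_cases hC : PySem.Chars.strip (cs.takeWhile (· != '\n')) = "---".toList
    · rw [if_pos hC] at hTM
      split
      · rename_i rest heq
        rw [hTM] at heq
        injection heq with heq
        subst heq
        have hC2 : PySem.Chars.strip (cs.takeWhile (· != '\n')) = ['-', '-', '-'] := hC
        cases hd : cs.dropWhile (· != '\n') with
        | nil =>
          simp only [hd]
          simp [pvF, hC2]
          rfl
        | cons a t =>
          rcases hr with h0 | h0
          · rw [h0] at hd; cases hd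
          · rw [hd] at h0
            simp only [List.head?_cons, Option.some.injEq] at h0
            subst h0
            simp only [hd]
            have hlt : t.length < n := by
              have h1 := List.length_dropWhile_le (· != '\n') cs
              rw [hd] at h1
              simp at h1
              omega
            have hIH := ih t.length hlt t le_rfl
              (fun c hc => hdomc c ((List.dropWhile_sublist _).subset (by rw [hd]; simp [hc])))
            have hF : List.flatMap pvF (pvSplit [] t) ≠ [] :=
              pvFlat_ne_nil _ (pvSplit_ne_nil _ _)
            rw [dif_neg (by simp)]
            show '\n' :: '-' :: '-' :: '-' :: '\n' :: '\n' :: pvGo ('\n'::t).tail =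
              PySem.Chars.join ['\n']
                (List.flatMap pvF (cs.takeWhile (· != '\n') :: pvSplit [] t))
            rw [List.flatMap_cons,
              show pvF (cs.takeWhile (· != '\n')) = [[], ['-', '-', '-'], []] from by
                simp [pvF, hC2],
              show ([[], ['-', '-', '-'], ([] : List Char)] ++
                List.flatMap pvF (pvSplit [] t)) = [] :: ['-', '-', '-'] :: [] ::
                List.flatMap pvF (pvSplit [] t) from rfl,
              pvJoinHead _ _ (by simp), pvJoinHead _ _ (by simp),
              pvJoinHead _ _ hF]
            rw [show ('\n'::t).tail = t from rfl, hIH]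
            simp
      · rename_i heq
        rw [hTM] at heq
        cases heq
    · rw [if_neg hC] at hTM
      split
      · rename_i rest heq
        rw [hTM] at heq
        cases heq
      · rename_i heq
        have hC2 : ¬ PySem.Chars.strip (cs.takeWhile (· != '\n')) = ['-', '-', '-'] := hC
        cases hd : cs.dropWhile (· != '\n') with
        | nil =>
          simp only [hd]
          simp [pvF, hC2, PySem.Chars.join_singleton]
        | cons a t =>
          rcases hr with h0 | h0
          · rw [h0] at hd; cases hd
          · rw [hd] at h0
            simp only [List.head?_cons, Option.some.injEq] at h0
            subst h0
            simp only [hd]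
            have hlt : t.length < n := by
              have h1 := List.length_dropWhile_le (· != '\n') cs
              rw [hd] at h1
              simp at h1
              omega
            have hIH := ih t.length hlt t le_rfl
              (fun c hc => hdomc c ((List.dropWhile_sublist _).subset (by rw [hd]; simp [hc])))
            rw [dif_neg (by simp)]
            show (cs.takeWhile (· != '\n') ++ '\n' :: pvGo ('\n'::t).tail) =
              PySem.Chars.join ['\n']
                (List.flatMap pvF (cs.takeWhile (· != '\n') :: pvSplit [] t))
            rw [List.flatMap_cons,
              show pvF (cs.takeWhile (· != '\n')) = [cs.takeWhile (· != '\n')] from by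
                simp [pvF, hC2],
              List.singleton_append,
              pvJoinHead _ _ (pvFlat_ne_nil _ (pvSplit_ne_nil _ _)),
              show ('\n'::t).tail = t from rfl, hIH]

-- ===== VERDICT (by name: the statement is the Claim_ definition above) =====
theorem convert_slide_breaks_spec : Claim_equal_convert_slide_breaks := by
  intro content hdom
  unfold Spec_convert_slide_breaks convert_slide_breaks convert_slide_breaks_alt
  have hsep : "\n".toList = ['\n'] := rfl
  simp only [hsep]
  rw [pvSplitOn_eq, pvFoldA, List.nil_append]
  rw [pvMain content.toList ?_]
  unfold Dom_convert_slide_breaks pvDomStr at hdom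
  exact fun c hc => List.all_eq_true.mp hdom c hc
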